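-- pv_equiv track=rewrite | github.com/AWS-Ai-Sketch-to-Cloud/aws-ai | backend/app/routers/github.py | _detect_flags
-- ===== SOURCE A (Python) =====
-- def _detect_flags(files: list[str]) -> dict[str, bool]:
--     lowered = [f.lower() for f in files]
--     return {
--         "dockerfile": any(path.endswith("dockerfile") for path in lowered),
--         "k8sManifests": any(("k8s" in path or "/kubernetes/" in path) and path.endswith((".yaml", ".yml")) for path in lowered),
--         "serverlessConfig": any(path.endswith(("serverless.yml", "serverless.yaml", "template.yml", "template.yaml")) for path in lowered),
--         "terraform": any(path.endswith(".tf") for path in lowered),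
--         "cdk": any(path.endswith("cdk.json") for path in lowered),
--         "githubActions": any(path.startswith(".github/workflows/") for path in lowered),
--         "readme": any(path.endswith("readme.md") for path in lowered),
--     }
-- ===== SOURCE B (Python) =====
-- _KEYS = ("dockerfile", "k8sManifests", "serverlessConfig", "terraform", "cdk",
--          "githubActions", "readme")
--
-- _SUFFIX_RULES = (
--     ("dockerfile", "dockerfile"),
--     ("serverless.yml", "serverlessConfig"),
--     ("serverless.yaml", "serverlessConfig"),
--     ("template.yml", "serverlessConfig"),
--     ("template.yaml", "serverlessConfig"),
--     (".tf", "terraform"),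
--     ("cdk.json", "cdk"),
--     ("readme.md", "readme"),
-- )
--
--
-- def _keys_for(p: str) -> set:
--     """Classify one lowered path into the set of flag keys it triggers."""
--     ks = set()
--     for suffix, key in _SUFFIX_RULES:
--         if p.endswith(suffix):
--             ks.add(key)
--     if ("k8s" in p or "/kubernetes/" in p) and p.endswith((".yaml", ".yml")):
--         ks.add("k8sManifests")
--     if p.startswith(".github/workflows/"):
--         ks.add("githubActions")
--     return ks
--
--
-- def _detect_flags(files: list[str]) -> dict[str, bool]:
--     hit = set()
--     for f in files:
--         hit |= _keys_for(f.lower())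
--     return {k: k in hit for k in _KEYS}
-- ===== Notes on version B (the rewrite author's own statement) =====
-- stated objective: alternative
-- what changed: Replaces A's seven hard-coded any()-scans with a table-driven classifier: a suffix-rule table (plus the two non-suffix rules) maps each lowered path to the set of flag keys it triggers, the per-file key sets are unioned over the files, and the dict is built by membership in that union.
import Mathlib
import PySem

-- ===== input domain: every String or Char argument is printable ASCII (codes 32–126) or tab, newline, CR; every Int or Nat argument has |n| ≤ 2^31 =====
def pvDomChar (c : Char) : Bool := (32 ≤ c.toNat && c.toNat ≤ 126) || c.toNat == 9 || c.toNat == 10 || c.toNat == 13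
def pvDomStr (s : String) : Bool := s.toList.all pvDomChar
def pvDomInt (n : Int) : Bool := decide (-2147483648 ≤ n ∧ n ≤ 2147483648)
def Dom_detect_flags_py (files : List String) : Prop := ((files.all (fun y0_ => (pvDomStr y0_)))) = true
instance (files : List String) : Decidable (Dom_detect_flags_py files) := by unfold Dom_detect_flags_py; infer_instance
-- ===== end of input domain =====

-- B replaces A's seven hard-coded any()-scans with a table-driven classifier: each
-- lowered path is mapped to the SET of flag keys it triggers (a suffix-rule table plus
-- the two non-suffix rules), the sets are unioned over the files, and the dict is built
-- by membership in that union (objective: alternative — data-driven rules, same cost).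

-- ===== PORT A =====
def detect_flags_py (files : List String) : List (String × Bool) :=
  let lowered := files.map (fun f => PySem.Str.lower f)
  [("dockerfile", lowered.any (fun path => PySem.Str.endswith path "dockerfile")),
   ("k8sManifests", lowered.any (fun path =>
      (PySem.Str.isIn "k8s" path || PySem.Str.isIn "/kubernetes/" path)
      && (PySem.Str.endswith path ".yaml" || PySem.Str.endswith path ".yml"))),
   ("serverlessConfig", lowered.any (fun path =>
      PySem.Str.endswith path "serverless.yml" || PySem.Str.endswith path "serverless.yaml"
      || PySem.Str.endswith path "template.yml" || PySem.Str.endswith path "template.yaml")),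
   ("terraform", lowered.any (fun path => PySem.Str.endswith path ".tf")),
   ("cdk", lowered.any (fun path => PySem.Str.endswith path "cdk.json")),
   ("githubActions", lowered.any (fun path => PySem.Str.startswith path ".github/workflows/")),
   ("readme", lowered.any (fun path => PySem.Str.endswith path "readme.md"))]

-- ===== PORT B =====
def pvKeysList : List String :=
  ["dockerfile", "k8sManifests", "serverlessConfig", "terraform", "cdk",
   "githubActions", "readme"]

def pvSuffixRules : List (String × String) :=
  [("dockerfile", "dockerfile"),
   ("serverless.yml", "serverlessConfig"),
   ("serverless.yaml", "serverlessConfig"),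
   ("template.yml", "serverlessConfig"),
   ("template.yaml", "serverlessConfig"),
   (".tf", "terraform"),
   ("cdk.json", "cdk"),
   ("readme.md", "readme")]

-- classify one lowered path into the set of flag keys it triggers
def pvKeysFor (p : String) : PySem.Set String :=
  let ks := pvSuffixRules.foldl
    (fun (ks : PySem.Set String) r =>
      if PySem.Str.endswith p r.1 then PySem.Set.add ks r.2 else ks)
    PySem.Set.empty
  let ks := if (PySem.Str.isIn "k8s" p || PySem.Str.isIn "/kubernetes/" p)
               && (PySem.Str.endswith p ".yaml" || PySem.Str.endswith p ".yml")
            then PySem.Set.add ks "k8sManifests" else ks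
  let ks := if PySem.Str.startswith p ".github/workflows/"
            then PySem.Set.add ks "githubActions" else ks
  ks

def detect_flags_py_alt (files : List String) : List (String × Bool) :=
  let hit := files.foldl
    (fun (hit : PySem.Set String) f => PySem.Set.union hit (pvKeysFor (PySem.Str.lower f)))
    PySem.Set.empty
  pvKeysList.map (fun k => (k, PySem.Set.contains hit k))

-- ===== PRECONDITION & SPEC =====
def Spec_detect_flags_py (files : List String) (out : List (String × Bool)) : Prop := out = detect_flags_py_alt files
instance (files : List String) (out : List (String × Bool)) : Decidable (Spec_detect_flags_py files out) := by unfold Spec_detect_flags_py; infer_instance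

-- ===== CLAIM =====
def Claim_equal_detect_flags_py : Prop := ∀ (files : List String), Dom_detect_flags_py files → Spec_detect_flags_py files (detect_flags_py files)

-- ===== LEMMAS AND PROOFS =====
theorem pv_mem_hit (files : List String) (k : String) :
    ∀ (s0 : PySem.Set String),
    (k ∈ files.foldl
      (fun (hit : PySem.Set String) f => PySem.Set.union hit (pvKeysFor (PySem.Str.lower f))) s0)
    ↔ (k ∈ s0 ∨ ∃ f ∈ files, k ∈ pvKeysFor (PySem.Str.lower f)) := by
  induction files with
  | nil => intro s0; simp
  | cons f rest ih =>
    intro s0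
    simp only [List.foldl_cons, ih, PySem.Set.mem_union, List.mem_cons]
    constructor
    · rintro (⟨h | h⟩ | h)
      · exact .inl h
      · exact .inr ⟨f, .inl rfl, h⟩
      · obtain ⟨g, hg, hk⟩ := h; exact .inr ⟨g, .inr hg, hk⟩
    · rintro (h | ⟨g, (rfl | hg), hk⟩)
      · exact .inl (.inl h)
      · exact .inl (.inr hk)
      · exact .inr ⟨g, hg, hk⟩

theorem pv_mem_ite_add {k x : String} {c : Prop} [Decidable c] {s : PySem.Set String} :
    (k ∈ (if c then PySem.Set.add s x else s)) ↔ (k ∈ s ∨ (c ∧ k = x)) := by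
  split_ifs with h <;> simp [PySem.Set.mem_add, h]

theorem pv_mem_foldl_rules (p k : String) :
    ∀ (rules : List (String × String)) (s0 : PySem.Set String),
    (k ∈ rules.foldl
        (fun (ks : PySem.Set String) r =>
          if PySem.Str.endswith p r.1 then PySem.Set.add ks r.2 else ks) s0)
    ↔ (k ∈ s0 ∨ ∃ r ∈ rules, PySem.Str.endswith p r.1 = true ∧ k = r.2) := by
  intro rules
  induction rules with
  | nil => intro s0; simp
  | cons r rest ih =>
    intro s0
    simp only [List.foldl_cons, ih, pv_mem_ite_add, List.exists_mem_cons_iff, or_assoc]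

theorem pv_contains_any (files : List String) (k : String) :
    PySem.Set.contains
      (files.foldl
        (fun (hit : PySem.Set String) f => PySem.Set.union hit (pvKeysFor (PySem.Str.lower f)))
        PySem.Set.empty) k
    = files.any (fun f => decide (k ∈ pvKeysFor (PySem.Str.lower f))) := by
  rw [Bool.eq_iff_iff]
  simp [pv_mem_hit, PySem.Set.empty, List.any_eq_true]

theorem pv_kf_docker (p : String) :
    decide ("dockerfile" ∈ pvKeysFor p) = PySem.Str.endswith p "dockerfile" := by
  rw [Bool.eq_iff_iff]
  unfold pvKeysFor
  simp only [pv_mem_ite_add, pv_mem_foldl_rules, pvSuffixRules, List.exists_mem_cons_iff,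
    decide_eq_true_eq]
  simp [PySem.Set.empty]

theorem pv_kf_k8s (p : String) :
    decide ("k8sManifests" ∈ pvKeysFor p) = ((PySem.Str.isIn "k8s" p || PySem.Str.isIn "/kubernetes/" p)
        && (PySem.Str.endswith p ".yaml" || PySem.Str.endswith p ".yml")) := by
  rw [Bool.eq_iff_iff]
  unfold pvKeysFor
  simp only [pv_mem_ite_add, pv_mem_foldl_rules, pvSuffixRules, List.exists_mem_cons_iff,
    decide_eq_true_eq]
  simp [PySem.Set.empty]

theorem pv_kf_svl (p : String) :
    decide ("serverlessConfig" ∈ pvKeysFor p) = (PySem.Str.endswith p "serverless.yml" || PySem.Str.endswith p "serverless.yaml"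
        || PySem.Str.endswith p "template.yml" || PySem.Str.endswith p "template.yaml") := by
  rw [Bool.eq_iff_iff]
  unfold pvKeysFor
  simp only [pv_mem_ite_add, pv_mem_foldl_rules, pvSuffixRules, List.exists_mem_cons_iff,
    decide_eq_true_eq]
  simp [PySem.Set.empty, or_assoc]

theorem pv_kf_tf (p : String) :
    decide ("terraform" ∈ pvKeysFor p) = PySem.Str.endswith p ".tf" := by
  rw [Bool.eq_iff_iff]
  unfold pvKeysFor
  simp only [pv_mem_ite_add, pv_mem_foldl_rules, pvSuffixRules, List.exists_mem_cons_iff,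
    decide_eq_true_eq]
  simp [PySem.Set.empty]

theorem pv_kf_cdk (p : String) :
    decide ("cdk" ∈ pvKeysFor p) = PySem.Str.endswith p "cdk.json" := by
  rw [Bool.eq_iff_iff]
  unfold pvKeysFor
  simp only [pv_mem_ite_add, pv_mem_foldl_rules, pvSuffixRules, List.exists_mem_cons_iff,
    decide_eq_true_eq]
  simp [PySem.Set.empty]

theorem pv_kf_gha (p : String) :
    decide ("githubActions" ∈ pvKeysFor p) = PySem.Str.startswith p ".github/workflows/" := by
  rw [Bool.eq_iff_iff]
  unfold pvKeysFor
  simp only [pv_mem_ite_add, pv_mem_foldl_rules, pvSuffixRules, List.exists_mem_cons_iff,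
    decide_eq_true_eq]
  simp [PySem.Set.empty]

theorem pv_kf_readme (p : String) :
    decide ("readme" ∈ pvKeysFor p) = PySem.Str.endswith p "readme.md" := by
  rw [Bool.eq_iff_iff]
  unfold pvKeysFor
  simp only [pv_mem_ite_add, pv_mem_foldl_rules, pvSuffixRules, List.exists_mem_cons_iff,
    decide_eq_true_eq]
  simp [PySem.Set.empty]

-- ===== VERDICT =====
theorem detect_flags_py_spec : Claim_equal_detect_flags_py := by
  intro files _
  unfold Spec_detect_flags_py detect_flags_py detect_flags_py_alt pvKeysList
  simp only [List.map_cons, List.map_nil, pv_contains_any, List.any_map, Function.comp_def,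
    pv_kf_docker, pv_kf_k8s, pv_kf_svl, pv_kf_tf, pv_kf_cdk, pv_kf_gha, pv_kf_readme]
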